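-- pv_equiv track=rewrite | github.com/arielurban20/-lottery-api-new | scripts/scrape_all_states_dom.py | split_main_numbers
-- ===== SOURCE A (Python) =====
-- GAME_RULES = {
--     "powerball": {"main_count": 5, "bonus_label": "Powerball", "mult_label": "Power Play"},
--     "powerball-double-play": {"main_count": 5, "bonus_label": "Powerball", "mult_label": None},
--     "mega-millions": {"main_count": 5, "bonus_label": "Mega Ball", "mult_label": "Megaplier"},
--     "millionaire-for-life": {"main_count": 5, "bonus_label": "Millionaire Ball", "mult_label": None},
--     "lotto-america": {"main_count": 5, "bonus_label": "Star Ball", "mult_label": "All Star Bonus"},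
--     "2by2": {"main_count": 4, "bonus_label": None, "mult_label": None},
--     "pick-2": {"main_count": 2, "bonus_label": None, "mult_label": None},
--     "pick-3": {"main_count": 3, "bonus_label": None, "mult_label": None},
--     "pick-4": {"main_count": 4, "bonus_label": None, "mult_label": None},
--     "pick-5": {"main_count": 5, "bonus_label": None, "mult_label": None},
--     "daily-3": {"main_count": 3, "bonus_label": None, "mult_label": None},
--     "daily-4": {"main_count": 4, "bonus_label": None, "mult_label": None},
--     "play-3": {"main_count": 3, "bonus_label": None, "mult_label": None},
--     "play-4": {"main_count": 4, "bonus_label": None, "mult_label": None},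
--     "play-5": {"main_count": 5, "bonus_label": None, "mult_label": None},
--     "numbers": {"main_count": 3, "bonus_label": None, "mult_label": None},
--     "numbers-game": {"main_count": 3, "bonus_label": None, "mult_label": None},
--     "win-4": {"main_count": 4, "bonus_label": None, "mult_label": None},
--     "take-5": {"main_count": 5, "bonus_label": None, "mult_label": None},
--     "cash-3": {"main_count": 3, "bonus_label": None, "mult_label": None},
--     "cash-4": {"main_count": 4, "bonus_label": None, "mult_label": None},
--     "cash-5": {"main_count": 5, "bonus_label": None, "mult_label": None},
--     "fantasy-5": {"main_count": 5, "bonus_label": None, "mult_label": None},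
--     "pick-6": {"main_count": 6, "bonus_label": None, "mult_label": None},
--     "lotto": {"main_count": 6, "bonus_label": None, "mult_label": None},
--     "cash-pop": {"main_count": 1, "bonus_label": None, "mult_label": None},
--     "pega-2": {"main_count": 2, "bonus_label": None, "mult_label": None},
--     "pega-3": {"main_count": 3, "bonus_label": None, "mult_label": None},
--     "pega-4": {"main_count": 4, "bonus_label": None, "mult_label": None},
--     "all-or-nothing": {"main_count": 12, "bonus_label": None, "mult_label": None},
--     "jersey-cash-5": {"main_count": 5, "bonus_label": None, "mult_label": None},
--     "georgia-five": {"main_count": 5, "bonus_label": None, "mult_label": None},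
--     "lucky-day-lotto": {"main_count": 5, "bonus_label": None, "mult_label": None},
--     "dc-3": {"main_count": 3, "bonus_label": None, "mult_label": None},
--     "dc-4": {"main_count": 4, "bonus_label": None, "mult_label": None},
--     "dc-5": {"main_count": 5, "bonus_label": None, "mult_label": None},
-- }
--
-- def split_main_numbers(title: str, game_slug: str, raw_numbers: list[int]) -> list[int]:
--     base = game_slug
--     for suffix in [
--         "-az", "-ar", "-ca", "-co", "-ct", "-de", "-fl", "-ga", "-id", "-il", "-in", "-ia",
--         "-ks", "-ky", "-la", "-me", "-md", "-ma", "-mi", "-mn", "-ms", "-mo", "-mt", "-ne",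
--         "-nh", "-nj", "-nm", "-ny", "-nc", "-nd", "-oh", "-ok", "-or", "-pa", "-pr", "-ri",
--         "-sc", "-sd", "-tn", "-tx", "-vt", "-va", "-wa", "-dc", "-wv", "-wi", "-wy"
--     ]:
--         if base.endswith(suffix):
--             base = base[:-len(suffix)]
--             break
--
--     rule = GAME_RULES.get(base)
--     if not rule:
--         return raw_numbers
--
--     return raw_numbers[: rule["main_count"]]
-- ===== SOURCE B (Python) =====
-- STATE_SUFFIXES = [
--     "-az", "-ar", "-ca", "-co", "-ct", "-de", "-fl", "-ga", "-id", "-il", "-in", "-ia",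
--     "-ks", "-ky", "-la", "-me", "-md", "-ma", "-mi", "-mn", "-ms", "-mo", "-mt", "-ne",
--     "-nh", "-nj", "-nm", "-ny", "-nc", "-nd", "-oh", "-ok", "-or", "-pa", "-pr", "-ri",
--     "-sc", "-sd", "-tn", "-tx", "-vt", "-va", "-wa", "-dc", "-wv", "-wi", "-wy",
-- ]
--
-- MAIN_COUNTS = {
--     "powerball": 5, "powerball-double-play": 5, "mega-millions": 5,
--     "millionaire-for-life": 5, "lotto-america": 5, "2by2": 4,
--     "pick-2": 2, "pick-3": 3, "pick-4": 4, "pick-5": 5,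
--     "daily-3": 3, "daily-4": 4, "play-3": 3, "play-4": 4, "play-5": 5,
--     "numbers": 3, "numbers-game": 3, "win-4": 4, "take-5": 5,
--     "cash-3": 3, "cash-4": 4, "cash-5": 5, "fantasy-5": 5,
--     "pick-6": 6, "lotto": 6, "cash-pop": 1,
--     "pega-2": 2, "pega-3": 3, "pega-4": 4,
--     "all-or-nothing": 12, "jersey-cash-5": 5, "georgia-five": 5,
--     "lucky-day-lotto": 5, "dc-3": 3, "dc-4": 4, "dc-5": 5,
-- }
--
-- # Precompute every recognised slug (each base game, plain and with each state
-- # suffix attached) into ONE flat table, so the function itself is a single lookup.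
-- FULL_COUNTS = {base + suf: count
--                for base, count in MAIN_COUNTS.items()
--                for suf in ["", *STATE_SUFFIXES]}
--
-- def split_main_numbers(title: str, game_slug: str, raw_numbers: list[int]) -> list[int]:
--     count = FULL_COUNTS.get(game_slug)
--     if count is None:
--         return raw_numbers
--     return raw_numbers[:count]
-- ===== Notes on version B (the rewrite author's own statement) =====
-- stated objective: alternative
-- what changed: A strips the slug at call time by scanning 47 endswith suffixes and then looks the stripped base up in GAME_RULES; B instead precomputes once, at module load, a single flat dict keyed by every recognised slug (each base game plain and with each state suffix attached), so the function body is one dict lookup with no suffix stripping at all.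
import Mathlib
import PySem

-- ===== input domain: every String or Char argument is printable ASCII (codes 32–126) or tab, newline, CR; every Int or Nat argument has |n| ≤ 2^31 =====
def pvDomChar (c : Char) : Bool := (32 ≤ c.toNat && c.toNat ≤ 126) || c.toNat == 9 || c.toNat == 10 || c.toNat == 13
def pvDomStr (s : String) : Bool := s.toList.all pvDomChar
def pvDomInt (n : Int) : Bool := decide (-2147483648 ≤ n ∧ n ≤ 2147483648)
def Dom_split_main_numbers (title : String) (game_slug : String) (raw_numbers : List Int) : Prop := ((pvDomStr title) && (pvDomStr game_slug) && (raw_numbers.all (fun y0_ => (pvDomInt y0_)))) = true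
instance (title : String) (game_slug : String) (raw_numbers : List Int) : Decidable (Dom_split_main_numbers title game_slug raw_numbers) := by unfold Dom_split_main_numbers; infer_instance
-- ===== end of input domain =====

-- B replaces A's per-call suffix-strip-then-lookup (a scan over 47 suffixes, then a dict get)
-- by one flat table precomputed once from every base game and every base+suffix combination,
-- so the function body is a single dict lookup; return value identical.

-- ===== PORT A =====
-- GAME_RULES: value = (main_count, bonus_label, mult_label)
def pvGameRules : PySem.Dict String (Int × Option String × Option String) :=
  PySem.Dict.ofList [
    ("powerball", (5, some "Powerball", some "Power Play")),
    ("powerball-double-play", (5, some "Powerball", none)),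
    ("mega-millions", (5, some "Mega Ball", some "Megaplier")),
    ("millionaire-for-life", (5, some "Millionaire Ball", none)),
    ("lotto-america", (5, some "Star Ball", some "All Star Bonus")),
    ("2by2", (4, none, none)),
    ("pick-2", (2, none, none)),
    ("pick-3", (3, none, none)),
    ("pick-4", (4, none, none)),
    ("pick-5", (5, none, none)),
    ("daily-3", (3, none, none)),
    ("daily-4", (4, none, none)),
    ("play-3", (3, none, none)),
    ("play-4", (4, none, none)),
    ("play-5", (5, none, none)),
    ("numbers", (3, none, none)),
    ("numbers-game", (3, none, none)),
    ("win-4", (4, none, none)),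
    ("take-5", (5, none, none)),
    ("cash-3", (3, none, none)),
    ("cash-4", (4, none, none)),
    ("cash-5", (5, none, none)),
    ("fantasy-5", (5, none, none)),
    ("pick-6", (6, none, none)),
    ("lotto", (6, none, none)),
    ("cash-pop", (1, none, none)),
    ("pega-2", (2, none, none)),
    ("pega-3", (3, none, none)),
    ("pega-4", (4, none, none)),
    ("all-or-nothing", (12, none, none)),
    ("jersey-cash-5", (5, none, none)),
    ("georgia-five", (5, none, none)),
    ("lucky-day-lotto", (5, none, none)),
    ("dc-3", (3, none, none)),
    ("dc-4", (4, none, none)),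
    ("dc-5", (5, none, none))]

def pvSuffixesA : List String :=
  ["-az", "-ar", "-ca", "-co", "-ct", "-de", "-fl", "-ga", "-id", "-il", "-in", "-ia",
   "-ks", "-ky", "-la", "-me", "-md", "-ma", "-mi", "-mn", "-ms", "-mo", "-mt", "-ne",
   "-nh", "-nj", "-nm", "-ny", "-nc", "-nd", "-oh", "-ok", "-or", "-pa", "-pr", "-ri",
   "-sc", "-sd", "-tn", "-tx", "-vt", "-va", "-wa", "-dc", "-wv", "-wi", "-wy"]

-- the 'for suffix in [...]: if base.endswith(suffix): base = base[:-len(suffix)]; break' loop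
def pvStripLoop : List String → String → String
  | [], base => base
  | suf :: rest, base =>
      if PySem.Str.endswith base suf then
        PySem.Str.slice base none (some (-(PySem.Str.len suf)))
      else pvStripLoop rest base

def split_main_numbers (title : String) (game_slug : String) (raw_numbers : List Int) : List Int :=
  let base := pvStripLoop pvSuffixesA game_slug
  match pvGameRules.get? base with
  | none => raw_numbers                                   -- 'if not rule' (rules are non-empty dicts, always truthy)
  | some rule => PySem.List.slice raw_numbers none (some rule.1)

-- ===== PORT B =====
def pvSuffixesB : List String :=
  ["-az", "-ar", "-ca", "-co", "-ct", "-de", "-fl", "-ga", "-id", "-il", "-in", "-ia",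
   "-ks", "-ky", "-la", "-me", "-md", "-ma", "-mi", "-mn", "-ms", "-mo", "-mt", "-ne",
   "-nh", "-nj", "-nm", "-ny", "-nc", "-nd", "-oh", "-ok", "-or", "-pa", "-pr", "-ri",
   "-sc", "-sd", "-tn", "-tx", "-vt", "-va", "-wa", "-dc", "-wv", "-wi", "-wy"]

def pvMainCounts : PySem.Dict String Int :=
  PySem.Dict.ofList [
    ("powerball", 5), ("powerball-double-play", 5), ("mega-millions", 5), ("millionaire-for-life", 5),
    ("lotto-america", 5), ("2by2", 4), ("pick-2", 2), ("pick-3", 3),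
    ("pick-4", 4), ("pick-5", 5), ("daily-3", 3), ("daily-4", 4),
    ("play-3", 3), ("play-4", 4), ("play-5", 5), ("numbers", 3),
    ("numbers-game", 3), ("win-4", 4), ("take-5", 5), ("cash-3", 3),
    ("cash-4", 4), ("cash-5", 5), ("fantasy-5", 5), ("pick-6", 6),
    ("lotto", 6), ("cash-pop", 1), ("pega-2", 2), ("pega-3", 3),
    ("pega-4", 4), ("all-or-nothing", 12), ("jersey-cash-5", 5), ("georgia-five", 5),
    ("lucky-day-lotto", 5), ("dc-3", 3), ("dc-4", 4), ("dc-5", 5)]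

-- the dict comprehension '{base + suf: count for base, count in MAIN_COUNTS.items() for suf in ["", *STATE_SUFFIXES]}'
-- (its keys are pairwise distinct, so the dict's items are exactly this pair list in order — Dict.mk is exact here)
def pvFullCounts : PySem.Dict String Int :=
  PySem.Dict.mk
    (pvMainCounts.items.flatMap (fun p => ("" :: pvSuffixesB).map (fun suf => (p.1 ++ suf, p.2))))

def split_main_numbers_alt (title : String) (game_slug : String) (raw_numbers : List Int) : List Int :=
  match pvFullCounts.get? game_slug with
  | none => raw_numbers
  | some count => PySem.List.slice raw_numbers none (some count)

-- ===== PRECONDITION & SPEC =====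
def Spec_split_main_numbers (title : String) (game_slug : String) (raw_numbers : List Int) (out : List Int) : Prop := out = split_main_numbers_alt title game_slug raw_numbers
instance (title : String) (game_slug : String) (raw_numbers : List Int) (out : List Int) : Decidable (Spec_split_main_numbers title game_slug raw_numbers out) := by unfold Spec_split_main_numbers; infer_instance

-- ===== CLAIM (what is proved, stated in full; the proofs are below) =====
def Claim_equal_split_main_numbers : Prop := ∀ (title : String) (game_slug : String) (raw_numbers : List Int), Dom_split_main_numbers title game_slug raw_numbers → Spec_split_main_numbers title game_slug raw_numbers (split_main_numbers title game_slug raw_numbers)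

-- ===== LEMMAS AND PROOFS =====

-- the base A's strip loop would produce for an input slug (proof-side abbreviation)
def pvBaseOf (k : String) : String :=
  if PySem.Str.slice k (some (-3)) none ∈ pvSuffixesA then PySem.Str.slice k none (some (-3)) else k

-- a length-3 suffix matches iff it equals the last three characters
lemma pv_endswith3 (s suf : String) (h3 : suf.toList.length = 3) :
    PySem.Str.endswith s suf = true ↔ PySem.Str.slice s (some (-3)) none = suf := by
  rw [show PySem.Str.endswith s suf = PySem.Chars.endswith s.toList suf.toList from by simp,
      PySem.Chars.endswith_iff]
  rw [show (PySem.Str.slice s (some (-3)) none = suf) ↔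
        (PySem.Str.slice s (some (-3)) none).toList = suf.toList from
      ⟨fun h => by rw [h], fun h => String.toList_inj.mp h⟩]
  rw [PySem.Str.toList_slice, PySem.Chars.slice_eq_listSlice,
      PySem.List.slice_from_neg_ofNat s.toList 3 (by omega)]
  constructor
  · rintro ⟨p, hp⟩
    rw [← hp, List.length_append, h3]
    simpa using List.drop_left p suf.toList
  · intro h
    rw [← h]
    exact List.drop_suffix _ _

-- the suffix loop of A computes pvBaseOf, for any list of length-3 suffixes
lemma pv_strip_eq (L : List String) (hL : ∀ suf ∈ L, suf.toList.length = 3) (s : String) :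
    pvStripLoop L s =
      if PySem.Str.slice s (some (-3)) none ∈ L then PySem.Str.slice s none (some (-3)) else s := by
  induction L with
  | nil => simp [pvStripLoop]
  | cons suf rest ih =>
    have h3 : suf.toList.length = 3 := hL suf (by simp)
    have hlen : suf.length = 3 := by
      have := String.length_toList (s := suf); omega
    by_cases hE : PySem.Str.endswith s suf = true
    · have ht : PySem.Str.slice s (some (-3)) none = suf := (pv_endswith3 s suf h3).mp hE
      have hE' : PySem.Chars.endswith s.toList suf.toList = true := by simpa using hE
      simp [pvStripLoop, hE', ht, hlen]
    · have ht : PySem.Str.slice s (some (-3)) none ≠ suf := fun h =>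
        hE ((pv_endswith3 s suf h3).mpr h)
      have hE' : ¬ PySem.Chars.endswith s.toList suf.toList = true := by
        intro h; exact hE (by simpa using h)
      simp [pvStripLoop, hE', ht, ih (fun u hu => hL u (by simp [hu]))]

-- decomposing 'k = b ++ suf' (|suf| = 3) into the two slices A takes
lemma pv_append3 (k b suf : String) (h3 : suf.toList.length = 3) :
    k = b ++ suf ↔
      (PySem.Str.slice k (some (-3)) none = suf ∧ PySem.Str.slice k none (some (-3)) = b) := by
  constructor
  · rintro rfl
    constructor
    · apply String.toList_inj.mp
      simp only [PySem.Str.toList_slice, PySem.Chars.slice_eq_listSlice, String.toList_append]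
      rw [PySem.List.slice_from_neg_ofNat _ 3 (by omega), List.length_append, h3]
      simpa using List.drop_left b.toList suf.toList
    · apply String.toList_inj.mp
      simp only [PySem.Str.toList_slice, PySem.Chars.slice_eq_listSlice, String.toList_append]
      rw [PySem.List.slice_to_neg_ofNat _ 3 (by omega), List.length_append, h3]
      simpa using List.take_left b.toList suf.toList
  · rintro ⟨h1, h2⟩
    apply String.toList_inj.mp
    have h1' := congrArg String.toList h1
    have h2' := congrArg String.toList h2
    simp only [PySem.Str.toList_slice, PySem.Chars.slice_eq_listSlice, String.toList_append] at h1' h2' ⊢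
    rw [PySem.List.slice_from_neg_ofNat _ 3 (by omega)] at h1'
    rw [PySem.List.slice_to_neg_ofNat _ 3 (by omega)] at h2'
    rw [← h1', ← h2', List.take_append_drop]

-- first-match lookup distributes over a concatenation of entry lists
lemma pv_mk_append (l1 l2 : List (String × Int)) (k : String) :
    (PySem.Dict.mk (l1 ++ l2)).get? k =
      ((PySem.Dict.mk l1).get? k).or ((PySem.Dict.mk l2).get? k) := by
  induction l1 with
  | nil =>
    have h : (PySem.Dict.mk ([] : List (String × Int))).get? k = none := by
      rw [PySem.Dict.get?_eq_none_iff_not_mem_keys]; simp [PySem.Dict.keys]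
    rw [List.nil_append, h, Option.none_or]
  | cons p rest ih =>
    obtain ⟨a, v⟩ := p
    rw [List.cons_append, PySem.Dict.get?_mk_cons, PySem.Dict.get?_mk_cons, ih]
    by_cases h : (a == k) = true
    · rw [if_pos h, if_pos h, Option.some_or]
    · rw [if_neg h, if_neg h]

-- the suffixed entries of one base: lookup hits iff k is b + some listed suffix
lemma pv_suffix_block (sufs : List String) (b : String) (c : Int) (k : String) :
    (PySem.Dict.mk (sufs.map (fun suf => (b ++ suf, c)))).get? k =
      if ∃ suf ∈ sufs, k = b ++ suf then some c else none := by
  induction sufs with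
  | nil =>
    rw [List.map_nil, if_neg (by rintro ⟨u, hu, -⟩; cases hu)]
    rw [PySem.Dict.get?_eq_none_iff_not_mem_keys]; simp [PySem.Dict.keys]
  | cons suf rest ih =>
    rw [List.map_cons, PySem.Dict.get?_mk_cons, ih]
    by_cases hk : k = b ++ suf
    · rw [if_pos (by simp [hk]), if_pos ⟨suf, by simp, hk⟩]
    · rw [if_neg (show ¬ ((b ++ suf == k) = true) by
        simp only [beq_iff_eq]; exact fun h => hk h.symm)]
      by_cases hex : ∃ u ∈ rest, k = b ++ u
      · obtain ⟨u, hu, hku⟩ := hex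
        rw [if_pos ⟨u, hu, hku⟩, if_pos ⟨u, List.mem_cons_of_mem _ hu, hku⟩]
      · rw [if_neg hex, if_neg (by
          rintro ⟨u, hu, hku⟩
          rcases List.mem_cons.mp hu with rfl | hu
          · exact hk hku
          · exact hex ⟨u, hu, hku⟩)]

-- one whole block of B's comprehension (base b whose own tail is not a state suffix)
lemma pv_block (b : String) (c : Int)
    (hb : PySem.Str.slice b (some (-3)) none ∉ pvSuffixesA) (k : String) :
    (PySem.Dict.mk (("" :: pvSuffixesA).map (fun suf => (b ++ suf, c)))).get? k =
      if pvBaseOf k = b then some c else none := by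
  have hL : ∀ suf ∈ pvSuffixesA, suf.toList.length = 3 := by decide
  rw [List.map_cons, PySem.Dict.get?_mk_cons, pv_suffix_block]
  by_cases hk : k = b
  · have hbase : pvBaseOf k = k := by
      unfold pvBaseOf; rw [if_neg (by rw [hk]; exact hb)]
    rw [if_pos (by simp [hk]), if_pos (by rw [hbase, hk])]
  · rw [if_neg (show ¬ ((b ++ "" == k) = true) by
      simp only [String.append_empty, beq_iff_eq]; exact fun h => hk h.symm)]
    by_cases hex : ∃ suf ∈ pvSuffixesA, k = b ++ suf
    · obtain ⟨suf, hmem, hku⟩ := hex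
      obtain ⟨h1, h2⟩ := (pv_append3 k b suf (hL suf hmem)).mp hku
      have hbase : pvBaseOf k = b := by
        unfold pvBaseOf; rw [h1, if_pos hmem]; exact h2
      rw [if_pos ⟨suf, hmem, hku⟩, if_pos hbase]
    · rw [if_neg hex, if_neg (by
        intro hB
        unfold pvBaseOf at hB
        by_cases hm : PySem.Str.slice k (some (-3)) none ∈ pvSuffixesA
        · rw [if_pos hm] at hB
          exact hex ⟨_, hm, (pv_append3 k b _ (hL _ hm)).mpr ⟨rfl, hB⟩⟩
        · rw [if_neg hm] at hB; exact hk hB)]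

-- B's whole comprehension: lookup at k = lookup of pvBaseOf k among the bases
lemma pv_build (L : List (String × Int))
    (hb : ∀ p ∈ L, PySem.Str.slice p.1 (some (-3)) none ∉ pvSuffixesA) (k : String) :
    ((PySem.Dict.mk
        (L.flatMap (fun p => ("" :: pvSuffixesA).map (fun suf => (p.1 ++ suf, p.2))))).get? k) =
      (PySem.Dict.mk L).get? (pvBaseOf k) := by
  induction L with
  | nil =>
    rw [List.flatMap_nil]
    have h : ∀ x : String, (PySem.Dict.mk ([] : List (String × Int))).get? x = none := fun x => by
      rw [PySem.Dict.get?_eq_none_iff_not_mem_keys]; simp [PySem.Dict.keys]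
    rw [h, h]
  | cons p rest ih =>
    obtain ⟨b, c⟩ := p
    rw [List.flatMap_cons, pv_mk_append, pv_block b c (hb (b, c) (by simp)),
        ih (fun q hq => hb q (by simp [hq])), PySem.Dict.get?_mk_cons]
    by_cases hpb : pvBaseOf k = b
    · rw [if_pos hpb, if_pos (by simp [hpb]), Option.some_or]
    · rw [if_neg hpb, if_neg (show ¬ ((b == pvBaseOf k) = true) by
        simp only [beq_iff_eq]; exact fun h => hpb h.symm), Option.none_or]

-- B's base table is the main_count projection of A's rule table
set_option maxRecDepth 8192 in
set_option maxHeartbeats 1600000 in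
lemma pv_counts_eq (k : String) :
    pvMainCounts.get? k = (pvGameRules.get? k).map (fun r => r.1) := by
  have hA : pvGameRules = PySem.Dict.mk [
    ("powerball", (5, some "Powerball", some "Power Play")),
    ("powerball-double-play", (5, some "Powerball", none)),
    ("mega-millions", (5, some "Mega Ball", some "Megaplier")),
    ("millionaire-for-life", (5, some "Millionaire Ball", none)),
    ("lotto-america", (5, some "Star Ball", some "All Star Bonus")),
    ("2by2", (4, none, none)),
    ("pick-2", (2, none, none)),
    ("pick-3", (3, none, none)),
    ("pick-4", (4, none, none)),
    ("pick-5", (5, none, none)),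
    ("daily-3", (3, none, none)),
    ("daily-4", (4, none, none)),
    ("play-3", (3, none, none)),
    ("play-4", (4, none, none)),
    ("play-5", (5, none, none)),
    ("numbers", (3, none, none)),
    ("numbers-game", (3, none, none)),
    ("win-4", (4, none, none)),
    ("take-5", (5, none, none)),
    ("cash-3", (3, none, none)),
    ("cash-4", (4, none, none)),
    ("cash-5", (5, none, none)),
    ("fantasy-5", (5, none, none)),
    ("pick-6", (6, none, none)),
    ("lotto", (6, none, none)),
    ("cash-pop", (1, none, none)),
    ("pega-2", (2, none, none)),
    ("pega-3", (3, none, none)),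
    ("pega-4", (4, none, none)),
    ("all-or-nothing", (12, none, none)),
    ("jersey-cash-5", (5, none, none)),
    ("georgia-five", (5, none, none)),
    ("lucky-day-lotto", (5, none, none)),
    ("dc-3", (3, none, none)),
    ("dc-4", (4, none, none)),
    ("dc-5", (5, none, none))] := by decide
  have hB : pvMainCounts = PySem.Dict.mk [
    ("powerball", 5), ("powerball-double-play", 5), ("mega-millions", 5), ("millionaire-for-life", 5),
    ("lotto-america", 5), ("2by2", 4), ("pick-2", 2), ("pick-3", 3),
    ("pick-4", 4), ("pick-5", 5), ("daily-3", 3), ("daily-4", 4),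
    ("play-3", 3), ("play-4", 4), ("play-5", 5), ("numbers", 3),
    ("numbers-game", 3), ("win-4", 4), ("take-5", 5), ("cash-3", 3),
    ("cash-4", 4), ("cash-5", 5), ("fantasy-5", 5), ("pick-6", 6),
    ("lotto", 6), ("cash-pop", 1), ("pega-2", 2), ("pega-3", 3),
    ("pega-4", 4), ("all-or-nothing", 12), ("jersey-cash-5", 5), ("georgia-five", 5),
    ("lucky-day-lotto", 5), ("dc-3", 3), ("dc-4", 4), ("dc-5", 5)] := by decide
  rw [hA, hB]
  simp only [PySem.Dict.get?_mk_cons]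
  simp only [apply_ite (Option.map (fun (r : Int × Option String × Option String) => r.1)),
    Option.map_some]
  rfl

-- B's precomputed table looked up at a slug = A's rule table looked up at the stripped base
set_option maxRecDepth 8192 in
set_option maxHeartbeats 1600000 in
lemma pv_full_eq (game_slug : String) :
    pvFullCounts.get? game_slug =
      (pvGameRules.get? (pvBaseOf game_slug)).map (fun r => r.1) := by
  have hdef : pvFullCounts = PySem.Dict.mk
      (pvMainCounts.items.flatMap (fun p => ("" :: pvSuffixesA).map (fun suf => (p.1 ++ suf, p.2)))) := rfl
  rw [hdef, pv_build pvMainCounts.items (by decide) game_slug,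
      show PySem.Dict.mk pvMainCounts.items = pvMainCounts from rfl, pv_counts_eq]

-- ===== VERDICT (by name: the statement is the Claim_ definition above) =====
set_option maxRecDepth 8192 in
set_option maxHeartbeats 1600000 in
theorem split_main_numbers_spec : Claim_equal_split_main_numbers := by
  intro title game_slug raw_numbers _
  unfold Spec_split_main_numbers split_main_numbers split_main_numbers_alt
  rw [pv_strip_eq pvSuffixesA (by decide) game_slug]
  rw [pv_full_eq game_slug]
  show (match pvGameRules.get? (pvBaseOf game_slug) with
        | none => raw_numbers
        | some rule => PySem.List.slice raw_numbers none (some rule.1)) =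
       (match (pvGameRules.get? (pvBaseOf game_slug)).map (fun r => r.1) with
        | none => raw_numbers
        | some count => PySem.List.slice raw_numbers none (some count))
  cases pvGameRules.get? (pvBaseOf game_slug) <;> rfl
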